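-- pv_equiv track=rewrite | github.com/Romeo2216/IA_Morpion | recursive_chat.py | find_canonical_board
-- ===== SOURCE A (Python) =====
-- def rotate_board(board):
--     return [board[6], board[3], board[0],
--             board[7], board[4], board[1],
--             board[8], board[5], board[2]]
--
-- def mirror_board(board):
--     return [board[2], board[1], board[0],
--             board[5], board[4], board[3],
--             board[8], board[7], board[6]]
--
-- def find_canonical_board(board):
--     boards = [board]  # L'originale
--     current_board = board
--
--     # Ajouter toutes les rotations
--     for _ in range(3):
--         current_board = rotate_board(current_board)
--         boards.append(current_board)
--
--     # Ajouter les miroirs et leurs rotations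
--     mirrored = mirror_board(board)
--     boards.append(mirrored)
--     current_board = mirrored
--     for _ in range(3):
--         current_board = rotate_board(current_board)
--         boards.append(current_board)
--
--     # Retourner la plus petite (celle qui vient en premier par ordre lexicographique)
--     return min(boards)
-- ===== SOURCE B (Python) =====
-- # Table-driven: the board itself plus its 7 nontrivial dihedral symmetries,
-- # each given by a fixed index permutation; one min over the candidates.
-- _PERMS = (
--     (6, 3, 0, 7, 4, 1, 8, 5, 2),
--     (8, 7, 6, 5, 4, 3, 2, 1, 0),
--     (2, 5, 8, 1, 4, 7, 0, 3, 6),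
--     (2, 1, 0, 5, 4, 3, 8, 7, 6),
--     (8, 5, 2, 7, 4, 1, 6, 3, 0),
--     (6, 7, 8, 3, 4, 5, 0, 1, 2),
--     (0, 3, 6, 1, 4, 7, 2, 5, 8),
-- )
--
-- def find_canonical_board(board):
--     return min([board] + [[board[i] for i in p] for p in _PERMS])
-- ===== Notes on version B (the rewrite author's own statement) =====
-- stated objective: simpler
-- what changed: Replaces the rotate/mirror helpers and the incremental composition loops with a precomputed table of the 7 nontrivial dihedral index permutations and a single min over the board plus its table-mapped images.
import Mathlib
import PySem

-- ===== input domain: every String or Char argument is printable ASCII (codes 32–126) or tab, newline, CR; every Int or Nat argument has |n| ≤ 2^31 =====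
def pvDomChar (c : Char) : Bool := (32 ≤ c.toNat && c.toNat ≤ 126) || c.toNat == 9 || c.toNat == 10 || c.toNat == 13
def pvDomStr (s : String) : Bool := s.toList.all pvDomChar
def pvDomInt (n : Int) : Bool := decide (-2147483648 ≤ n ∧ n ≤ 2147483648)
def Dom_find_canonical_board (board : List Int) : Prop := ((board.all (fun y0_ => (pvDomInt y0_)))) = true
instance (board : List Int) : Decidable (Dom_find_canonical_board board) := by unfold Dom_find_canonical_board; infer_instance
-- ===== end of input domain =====

-- B replaces A's rotate/mirror composition loops by a fixed table of the 8 dihedral index permutations (simpler decomposition, same cost).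


-- ===== PORT A =====
def pvGet (b : List Int) (i : Int) : Int := (PySem.List.pyGet? b i).getD 0
-- pvGet is exact (Python board[i]) whenever the index is in range; Pre_ guarantees length 9,
-- so every index 0..8 below is in range on admitted inputs.
def rotate_board (b : List Int) : List Int :=
  [pvGet b 6, pvGet b 3, pvGet b 0,
   pvGet b 7, pvGet b 4, pvGet b 1,
   pvGet b 8, pvGet b 5, pvGet b 2]

def mirror_board (b : List Int) : List Int :=
  [pvGet b 2, pvGet b 1, pvGet b 0,
   pvGet b 5, pvGet b 4, pvGet b 3,
   pvGet b 8, pvGet b 7, pvGet b 6]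

def find_canonical_board (board : List Int) : List Int :=
  let st1 := (List.range 3).foldl
    (fun (st : List (List Int) × List Int) _ =>
      let c := rotate_board st.2
      (st.1 ++ [c], c)) ([board], board)
  let mirrored := mirror_board board
  let st2 := (List.range 3).foldl
    (fun (st : List (List Int) × List Int) _ =>
      let c := rotate_board st.2
      (st.1 ++ [c], c)) (st1.1 ++ [mirrored], mirrored)
  (PySem.List.min? st2.1 (fun x => x)).getD []

-- ===== PORT B =====
def pvPerms : List (List Int) :=
  [[6, 3, 0, 7, 4, 1, 8, 5, 2],
   [8, 7, 6, 5, 4, 3, 2, 1, 0],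
   [2, 5, 8, 1, 4, 7, 0, 3, 6],
   [2, 1, 0, 5, 4, 3, 8, 7, 6],
   [8, 5, 2, 7, 4, 1, 6, 3, 0],
   [6, 7, 8, 3, 4, 5, 0, 1, 2],
   [0, 3, 6, 1, 4, 7, 2, 5, 8]]

def find_canonical_board_alt (board : List Int) : List Int :=
  (PySem.List.min?
    (board :: pvPerms.map (fun p => p.map (fun i => (PySem.List.pyGet? board i).getD 0)))
    (fun x => x)).getD []

-- ===== PRECONDITION & SPEC =====
-- Pre_ excludes boards with fewer than 9 cells: there A raises IndexError (board[6] etc.).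
def Pre_find_canonical_board (board : List Int) : Prop := 9 ≤ board.length
instance (board : List Int) : Decidable (Pre_find_canonical_board board) := by
  unfold Pre_find_canonical_board; infer_instance
def pvWitness_find_canonical_board : List Int := [0, 1, 2, 3, 4, 5, 6, 7, 8]

def Spec_find_canonical_board (board : List Int) (out : List Int) : Prop := out = find_canonical_board_alt board
instance (board : List Int) (out : List Int) : Decidable (Spec_find_canonical_board board out) := by unfold Spec_find_canonical_board; infer_instance

-- ===== CLAIM (what is proved, stated in full; the proofs are below) =====
def Claim_equal_find_canonical_board : Prop := ∀ (board : List Int), Dom_find_canonical_board board → Pre_find_canonical_board board → Spec_find_canonical_board board (find_canonical_board board)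

-- ===== LEMMAS AND PROOFS =====

-- ===== VERDICT (by name: the statement is the Claim_ definition above) =====
theorem find_canonical_board_spec : Claim_equal_find_canonical_board := by
  intro board _ hpre
  match board, hpre with
  | a :: b :: c :: d :: e :: f :: g :: h :: i :: rest, _ => rfl
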